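-- pv_equiv track=rewrite | github.com/Avani1992/python | max_mim_sum.py | mi_max_sum
-- ===== SOURCE A (Python) =====
-- def mi_max_sum(x):
--
--   max1=max(x)
--   min1=min(x)
--   max_sum=0
--   min_sum=0
--   for i in x:
--     if(i==max1):
--       pass
--     else:
--       min_sum=min_sum+i
--
--     if(i==min1):
--       pass
--     else:
--       max_sum=max_sum+i
--
--
--   return (min_sum,max_sum)
-- ===== SOURCE B (Python) =====
-- def mi_max_sum(x):
--   max1 = max(x)
--   min1 = min(x)
--   total = sum(x)
--   return (total - max1 * x.count(max1), total - min1 * x.count(min1))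
-- ===== Notes on version B (the rewrite author's own statement) =====
-- stated objective: simpler
-- what changed: Replaces the per-element branching accumulation loop with a closed form: sum the whole list once and subtract extremum*count for each side.
import Mathlib
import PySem

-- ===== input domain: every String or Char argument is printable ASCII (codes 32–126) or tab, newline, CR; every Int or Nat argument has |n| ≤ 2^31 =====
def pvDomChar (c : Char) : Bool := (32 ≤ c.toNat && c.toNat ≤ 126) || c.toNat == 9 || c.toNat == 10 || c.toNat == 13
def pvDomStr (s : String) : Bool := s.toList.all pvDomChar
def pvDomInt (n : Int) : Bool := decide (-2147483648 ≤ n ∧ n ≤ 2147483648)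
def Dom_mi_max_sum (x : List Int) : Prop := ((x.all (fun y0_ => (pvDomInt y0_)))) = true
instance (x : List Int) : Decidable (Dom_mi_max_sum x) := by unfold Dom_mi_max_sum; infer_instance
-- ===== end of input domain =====

-- B replaces A's per-element branching loop with the closed form total - extremum*count (objective: simpler).

-- ===== PORT A =====
def mi_max_sum (x : List Int) : Int × Int :=
  match PySem.List.max? x (fun y => y), PySem.List.min? x (fun y => y) with
  | some max1, some min1 =>
    let p := x.foldl (fun (p : Int × Int) i =>
      (if i == max1 then p.1 else p.1 + i,
       if i == min1 then p.2 else p.2 + i)) (0, 0)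
    (p.1, p.2)
  | _, _ => (0, 0)   -- unreachable under Pre_ (Python raises ValueError on empty x)

-- ===== PORT B =====
def mi_max_sum_alt (x : List Int) : Int × Int :=
  match PySem.List.max? x (fun y => y) with
  | none => (0, 0)   -- unreachable under Pre_ (Python raises ValueError on empty x)
  | some max1 =>
    match PySem.List.min? x (fun y => y) with
    | none => (0, 0)
    | some min1 =>
      let total := x.sum
      (total - max1 * (x.count max1 : Int), total - min1 * (x.count min1 : Int))

-- ===== PRECONDITION & SPEC =====
-- Pre_ excludes only the empty list, on which Python's max(x) raises ValueError.
def Pre_mi_max_sum (x : List Int) : Prop := x ≠ []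
instance (x : List Int) : Decidable (Pre_mi_max_sum x) := by unfold Pre_mi_max_sum; infer_instance
def pvWitness_mi_max_sum : List Int := ([1, 2, 2, 3])

def Spec_mi_max_sum (x : List Int) (out : Int × Int) : Prop := out = mi_max_sum_alt x
instance (x : List Int) (out : Int × Int) : Decidable (Spec_mi_max_sum x out) := by unfold Spec_mi_max_sum; infer_instance

-- ===== CLAIM (what is proved, stated in full; the proofs are below) =====
def Claim_equal_mi_max_sum : Prop := ∀ (x : List Int), Dom_mi_max_sum x → Pre_mi_max_sum x → Spec_mi_max_sum x (mi_max_sum x)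

-- ===== LEMMAS AND PROOFS =====

-- The loop pair equals (acc + sum - max1*count max1, acc + sum - min1*count min1).
theorem mi_max_sum_loop (max1 min1 : Int) :
    ∀ (l : List Int) (a b : Int),
      l.foldl (fun (p : Int × Int) i =>
        (if i == max1 then p.1 else p.1 + i,
         if i == min1 then p.2 else p.2 + i)) (a, b)
      = (a + l.sum - max1 * (l.count max1 : Int),
         b + l.sum - min1 * (l.count min1 : Int)) := by
  intro l
  induction l with
  | nil => intro a b; simp
  | cons i t ih =>
    intro a b
    simp only [List.foldl_cons, ih, List.sum_cons, List.count_cons]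
    refine Prod.ext ?_ ?_ <;> simp only [] <;>
      split_ifs with h <;> simp_all <;> ring

-- ===== VERDICT (by name: the statement is the Claim_ definition above) =====
theorem mi_max_sum_spec : Claim_equal_mi_max_sum := by
  intro x _ hpre
  unfold Spec_mi_max_sum mi_max_sum mi_max_sum_alt
  cases x with
  | nil => exact absurd rfl hpre
  | cons h t =>
    simp only [PySem.List.max?_id_cons, PySem.List.min?_id_cons, mi_max_sum_loop]
    simp [List.sum_cons]
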